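-- pv_equiv track=rewrite | github.com/Arafat04H09/leetcode-solutions | 2127-MaximumEmployeestoBeInvitedtoaMeeting/2127-MaximumEmployeestoBeInvitedtoaMeeting.py | get_maximum_circle_size
-- ===== SOURCE A (Python) =====
-- def get_maximum_circle_size(edges: list[int]) -> int:
--     """Given a graph where each node has exactly one out-going edge, return the maximum circle size."""
--
--     def get_maximum_circle_size_from(i: int) -> int:
--         """Return the maximum circle size where it can be reached from node i or -1 if we reached to explored node first."""
--         start = i  # The starting node index.
--         curr = i  # The node index at each iteration.
--         path = set()  # Store node indices on the current path.
--
--         # Explore graph until we find the circle or explored node.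
--         while curr not in visited:
--             visited.add(curr)
--             path.add(curr)
--             curr = edges[curr]
--
--         # If we reached to one of the explored node before finding a new circle, abort.
--         if curr not in path:  # but curr in visited.
--             return -1
--
--         # Otherwise, we have found a new circle, so determine its size.
--         cursum = len(path)
--         while start != curr:
--             cursum -= 1
--             start = edges[start]
--         return cursum
--
--     visited: set[int] = set()  # set of visited node indices.
--     return max((get_maximum_circle_size_from(i) for i in range(len(edges))))
-- ===== SOURCE B (Python) =====
-- def get_maximum_circle_size(edges: list[int]) -> int:
--     """Given a graph where each node has exactly one out-going edge, return the maximum circle size."""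
--
--     def cycle_size_from(i: int) -> int:
--         """Walk from i recording each node's step index; derive the cycle size by index arithmetic."""
--         order: dict[int, int] = {}  # node -> its step index on the current walk
--         curr = i
--         while curr not in visited:
--             visited.add(curr)
--             order[curr] = len(order)
--             curr = edges[curr]
--         if curr in order:
--             return len(order) - order[curr]
--         return -1
--
--     visited: set[int] = set()
--     sizes = [cycle_size_from(i) for i in range(len(edges))]
--     return max(sizes)
-- ===== Notes on version B (the rewrite author's own statement) =====
-- stated objective: simpler
-- what changed: Each node's step index along the walk is recorded in a dict, so the cycle length is len(order) - order[curr] by index arithmetic, deleting A's whole second re-walk loop.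
import Mathlib
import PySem

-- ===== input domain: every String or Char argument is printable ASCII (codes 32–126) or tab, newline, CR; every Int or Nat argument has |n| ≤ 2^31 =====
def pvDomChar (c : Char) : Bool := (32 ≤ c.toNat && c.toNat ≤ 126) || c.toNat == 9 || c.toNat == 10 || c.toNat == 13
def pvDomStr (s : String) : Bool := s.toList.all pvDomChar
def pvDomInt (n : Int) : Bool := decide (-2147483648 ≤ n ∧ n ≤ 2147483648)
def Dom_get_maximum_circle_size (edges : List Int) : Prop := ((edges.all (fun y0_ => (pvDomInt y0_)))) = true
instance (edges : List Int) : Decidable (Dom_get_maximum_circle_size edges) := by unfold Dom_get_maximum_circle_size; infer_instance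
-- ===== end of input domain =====

-- B replaces A's second re-walk loop by a dict of step indices: cycle size = len(order) - order[curr] (objective: simpler).

-- ===== PORT A =====
-- the inner 'while curr not in visited' loop; fuel bounds the iterations (each one adds a fresh node to visited)
def aLoop1 (edges : List Int) : Nat → PySem.Set Int → PySem.Set Int → Int →
    Option (PySem.Set Int × PySem.Set Int × Int)
  | 0, _, _, _ => none
  | fuel+1, visited, path, curr =>
    if PySem.Set.contains visited curr then some (visited, path, curr)
    else
      match PySem.List.pyGet? edges curr with
      | none => none                        -- IndexError (outside Pre_)
      | some nxt => aLoop1 edges fuel (PySem.Set.add visited curr) (PySem.Set.add path curr) nxt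

-- the second 'while start != curr' loop decrementing cursum
def aLoop2 (edges : List Int) : Nat → Int → Int → Int → Option Int
  | 0, _, _, _ => none
  | fuel+1, cursum, start, curr =>
    if start = curr then some cursum
    else
      match PySem.List.pyGet? edges start with
      | none => none                        -- IndexError (outside Pre_)
      | some nxt => aLoop2 edges fuel (cursum - 1) nxt curr

-- get_maximum_circle_size_from(i); returns (result, updated shared visited)
def aFrom (edges : List Int) (visited : PySem.Set Int) (i : Int) : Option (Int × PySem.Set Int) :=
  match aLoop1 edges (2 * edges.length + 2) visited PySem.Set.empty i with
  | none => none
  | some (v, path, curr) =>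
    if PySem.Set.contains path curr then
      match aLoop2 edges (2 * edges.length + 2) (path.length : Int) i curr with
      | none => none
      | some s => some (s, v)
    else some (-1, v)

-- max(generator): running maximum over the remaining indices, threading the shared visited set
def aFold (edges : List Int) : List Int → PySem.Set Int → Int → Option Int
  | [], _, best => some best
  | i :: rest, visited, best =>
    match aFrom edges visited i with
    | none => none
    | some (s, v') => aFold edges rest v' (max best s)

def get_maximum_circle_size (edges : List Int) : Int :=
  (match PySem.List.pyRange 0 (PySem.List.len edges) 1 with
   | [] => none                             -- max() of empty generator: ValueError (outside Pre_)
   | i :: rest =>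
     match aFrom edges PySem.Set.empty i with
     | none => none
     | some (s, v) => aFold edges rest v s).getD 0

-- ===== PORT B =====
-- single walk recording each node's step index: order[curr] = len(order)
def bLoop (edges : List Int) : Nat → PySem.Set Int → PySem.Dict Int Int → Int →
    Option (PySem.Set Int × PySem.Dict Int Int × Int)
  | 0, _, _, _ => none
  | fuel+1, visited, order, curr =>
    if PySem.Set.contains visited curr then some (visited, order, curr)
    else
      match PySem.List.pyGet? edges curr with
      | none => none                        -- IndexError (outside Pre_)
      | some nxt =>
        bLoop edges fuel (PySem.Set.add visited curr) (PySem.Dict.insert order curr (PySem.Dict.size order : Int)) nxt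

-- cycle_size_from(i); returns (result, updated shared visited)
def bFrom (edges : List Int) (visited : PySem.Set Int) (i : Int) : Option (Int × PySem.Set Int) :=
  match bLoop edges (2 * edges.length + 2) visited PySem.Dict.empty i with
  | none => none
  | some (v, order, curr) =>
    match PySem.Dict.get? order curr with
    | some k => some ((PySem.Dict.size order : Int) - k, v)
    | none => some (-1, v)

-- the list comprehension [cycle_size_from(i) for i in range(len(edges))], threading visited
def bAll (edges : List Int) : List Int → PySem.Set Int → Option (List Int)
  | [], _ => some []
  | i :: rest, visited =>
    match bFrom edges visited i with
    | none => none
    | some (s, v') => (bAll edges rest v').map (fun ss => s :: ss)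

def get_maximum_circle_size_alt (edges : List Int) : Int :=
  ((bAll edges (PySem.List.pyRange 0 (PySem.List.len edges) 1) PySem.Set.empty).bind
    (fun sizes => PySem.List.max? sizes (fun y => y))).getD 0   -- max([]) raises ValueError (outside Pre_)

-- ===== PRECONDITION & SPEC =====
-- Pre_ excludes exactly the inputs where the Python A raises: the empty list (max() over an
-- empty generator raises ValueError) and lists with an entry outside [-len, len) (IndexError).
def Pre_get_maximum_circle_size (edges : List Int) : Prop :=
  edges ≠ [] ∧ ∀ e ∈ edges, -(edges.length : Int) ≤ e ∧ e < (edges.length : Int)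
instance (edges : List Int) : Decidable (Pre_get_maximum_circle_size edges) := by
  unfold Pre_get_maximum_circle_size; infer_instance

def pvWitness_get_maximum_circle_size : List Int := [1, 2, 0, 1]

def Spec_get_maximum_circle_size (edges : List Int) (out : Int) : Prop := out = get_maximum_circle_size_alt edges
instance (edges : List Int) (out : Int) : Decidable (Spec_get_maximum_circle_size edges out) := by unfold Spec_get_maximum_circle_size; infer_instance

-- ===== CLAIM (what is proved, stated in full; the proofs are below) =====
def Claim_equal_get_maximum_circle_size : Prop := ∀ (edges : List Int), Dom_get_maximum_circle_size edges → Pre_get_maximum_circle_size edges → Spec_get_maximum_circle_size edges (get_maximum_circle_size edges)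

-- ===== LEMMAS AND PROOFS =====

-- proof-only abstraction of the shared walk: the list of freshly visited nodes and the stopping node
def pvWalk (edges : List Int) : Nat → PySem.Set Int → Int → Option (List Int × Int)
  | 0, _, _ => none
  | fuel+1, visited, curr =>
    if PySem.Set.contains visited curr then some ([], curr)
    else
      match PySem.List.pyGet? edges curr with
      | none => none
      | some nxt => (pvWalk edges fuel (PySem.Set.add visited curr) nxt).map (fun qc => (curr :: qc.1, qc.2))

lemma aLoop1_eq_walk (edges : List Int) : ∀ (fuel : Nat) (visited path : PySem.Set Int) (curr : Int),
    aLoop1 edges fuel visited path curr =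
      (pvWalk edges fuel visited curr).map
        (fun qc => (qc.1.foldl PySem.Set.add visited, qc.1.foldl PySem.Set.add path, qc.2)) := by
  intro fuel
  induction fuel with
  | zero => intro visited path curr; rfl
  | succ n ih =>
    intro visited path curr
    simp only [aLoop1, pvWalk]
    split
    · rfl
    · cases h : PySem.List.pyGet? edges curr with
      | none => rfl
      | some nxt =>
        simp only [ih, Option.map_map]
        cases pvWalk edges n (PySem.Set.add visited curr) nxt <;> simp [List.foldl]

lemma bLoop_eq_walk (edges : List Int) : ∀ (fuel : Nat) (visited : PySem.Set Int)
    (order : PySem.Dict Int Int) (curr : Int),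
    bLoop edges fuel visited order curr =
      (pvWalk edges fuel visited curr).map
        (fun qc => (qc.1.foldl PySem.Set.add visited,
                    qc.1.foldl (fun d x => PySem.Dict.insert d x (PySem.Dict.size d : Int)) order, qc.2)) := by
  intro fuel
  induction fuel with
  | zero => intro visited order curr; rfl
  | succ n ih =>
    intro visited order curr
    simp only [bLoop, pvWalk]
    split
    · rfl
    · cases h : PySem.List.pyGet? edges curr with
      | none => rfl
      | some nxt =>
        simp only [ih, Option.map_map]
        cases pvWalk edges n (PySem.Set.add visited curr) nxt <;> simp [List.foldl]

-- the walk visits pairwise-distinct nodes, all fresh w.r.t. the initial visited set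
lemma walk_fresh (edges : List Int) : ∀ (fuel : Nat) (visited : PySem.Set Int) (curr : Int)
    (q : List Int) (c : Int), pvWalk edges fuel visited curr = some (q, c) →
    q.Nodup ∧ ∀ x ∈ q, x ∉ visited := by
  intro fuel
  induction fuel with
  | zero => intro _ _ _ _ h; simp [pvWalk] at h
  | succ n ih =>
    intro visited curr q c h
    simp only [pvWalk] at h
    split at h
    · simp_all
    · cases hg : PySem.List.pyGet? edges curr with
      | none => simp [hg] at h
      | some nxt =>
        rw [hg] at h
        cases hw : pvWalk edges n (PySem.Set.add visited curr) nxt with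
        | none => simp [hw] at h
        | some qc =>
          simp only [hw, Option.map_some, Option.some.injEq, Prod.mk.injEq] at h
          obtain ⟨hnd, hfr⟩ := ih (PySem.Set.add visited curr) nxt qc.1 qc.2 (by simp [hw])
          rw [← h.1]
          constructor
          · refine List.nodup_cons.mpr ⟨fun hmem => ?_, hnd⟩
            exact hfr curr hmem ((PySem.Set.mem_add _ _ _).mpr (Or.inr rfl))
          · intro x hx
            rcases List.mem_cons.mp hx with rfl | hx'
            · intro hmem
              exact ‹¬ PySem.Set.contains visited x = true› ((PySem.Set.contains_iff _ _).mpr hmem)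
            · intro hmem
              exact hfr x hx' ((PySem.Set.mem_add _ _ _).mpr (Or.inl hmem))

lemma walk_length_le (edges : List Int) : ∀ (fuel : Nat) (visited : PySem.Set Int) (curr : Int)
    (q : List Int) (c : Int), pvWalk edges fuel visited curr = some (q, c) → q.length ≤ fuel := by
  intro fuel
  induction fuel with
  | zero => intro _ _ _ _ h; simp [pvWalk] at h
  | succ n ih =>
    intro visited curr q c h
    simp only [pvWalk] at h
    split at h
    · simp_all
    · cases hg : PySem.List.pyGet? edges curr with
      | none => simp [hg] at h
      | some nxt =>
        rw [hg] at h
        cases hw : pvWalk edges n (PySem.Set.add visited curr) nxt with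
        | none => simp [hw] at h
        | some qc =>
          simp only [hw, Option.map_some, Option.some.injEq, Prod.mk.injEq] at h
          have := ih _ _ _ _ hw
          rw [← h.1]
          simp only [List.length_cons]
          omega

-- a foldl of Set.add over fresh distinct elements is list append
lemma foldl_add_fresh (q : List Int) (s : PySem.Set Int) (hnd : q.Nodup) (hfr : ∀ x ∈ q, x ∉ s) :
    q.foldl PySem.Set.add s = s ++ q := by
  rw [show q.foldl PySem.Set.add s = PySem.Set.update s q from rfl]
  exact PySem.Set.update_eq_append_of_disjoint s q hnd hfr

-- order dict built by the walk: size counts q, lookup returns step indices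
lemma ordFold_spec : ∀ (q : List Int) (d : PySem.Dict Int Int), q.Nodup →
    (∀ x ∈ q, PySem.Dict.get? d x = none) →
    (PySem.Dict.size (q.foldl (fun d x => PySem.Dict.insert d x (PySem.Dict.size d : Int)) d) =
       PySem.Dict.size d + q.length ∧
     ∀ c, PySem.Dict.get? (q.foldl (fun d x => PySem.Dict.insert d x (PySem.Dict.size d : Int)) d) c =
       if c ∈ q then some ((PySem.Dict.size d : Int) + (q.idxOf c : Int)) else PySem.Dict.get? d c) := by
  intro q
  induction q with
  | nil => intro d _ _; simp
  | cons x t ih =>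
    intro d hnd hfr
    have hx : PySem.Dict.get? d x = none := hfr x (by simp)
    have hxs : PySem.Dict.contains d x = false := (PySem.Dict.get?_eq_none_iff_contains d x).mp hx
    have hitems : (PySem.Dict.insert d x (PySem.Dict.size d : Int)).items
        = d.items ++ [(x, (PySem.Dict.size d : Int))] := by
      have := PySem.Dict.items_foldl_insert_fresh (l := [x]) (k := fun a => a)
        (v := fun _ => (PySem.Dict.size d : Int)) (d := d)
        (by intro a ha; simp at ha; subst ha; exact hxs) (by simp)
      simpa using this
    have hsize : PySem.Dict.size (PySem.Dict.insert d x (PySem.Dict.size d : Int))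
        = PySem.Dict.size d + 1 := by
      show (PySem.Dict.insert d x (PySem.Dict.size d : Int)).items.length = d.items.length + 1
      simp [hitems]
    have hxt : x ∉ t := (List.nodup_cons.mp hnd).1
    obtain ⟨ihs, ihg⟩ := ih (PySem.Dict.insert d x (PySem.Dict.size d : Int))
      (List.nodup_cons.mp hnd).2
      (by
        intro y hy
        rw [PySem.Dict.get?_insert_of_ne _ _ (fun hyx => hxt (by rw [← hyx]; exact hy))]
        exact hfr y (by simp [hy]))
    constructor
    · simpa [hsize, Nat.add_assoc, Nat.add_comm 1] using ihs
    · intro c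
      rw [List.foldl_cons, ihg c]
      by_cases hct : c ∈ t
      · have hcx : c ≠ x := fun h => hxt (h ▸ hct)
        simp only [List.mem_cons, hct, or_true, if_true, hsize]
        rw [List.idxOf_cons]
        have hbeq : (x == c) = false := beq_eq_false_iff_ne.mpr (Ne.symm hcx)
        simp [hbeq]
        push_cast
        ring
      · by_cases hcx : c = x
        · have h1 : (PySem.Dict.insert d x ((d.size : Int))).get? x = some ((d.size : Int)) :=
            PySem.Dict.get?_insert_self d x _
          have hidx : List.idxOf x (x :: t) = 0 := by
            rw [List.idxOf_cons]; simp
          simp [hcx, hxt, h1, hidx]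
        · simp only [hct, if_false, List.mem_cons, hcx, false_or, if_false]
          exact PySem.Dict.get?_insert_of_ne _ _ hcx

-- A's second loop returns len(path) minus the step index of curr
lemma aLoop2_spec (edges : List Int) : ∀ (fuel : Nat) (visited : PySem.Set Int) (i : Int)
    (q : List Int) (c : Int) (fuel2 : Nat) (cursum : Int),
    pvWalk edges fuel visited i = some (q, c) → c ∈ q → q.idxOf c < fuel2 →
    aLoop2 edges fuel2 cursum i c = some (cursum - (q.idxOf c : Int)) := by
  intro fuel
  induction fuel with
  | zero => intro _ _ _ _ _ _ h; simp [pvWalk] at h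
  | succ n ih =>
    intro visited i q c fuel2 cursum h hc hf2
    simp only [pvWalk] at h
    split at h
    · simp only [Option.some.injEq, Prod.mk.injEq] at h
      rw [← h.1] at hc
      exact absurd hc (List.not_mem_nil)
    · cases hg : PySem.List.pyGet? edges i with
      | none => simp [hg] at h
      | some nxt =>
        rw [hg] at h
        cases hw : pvWalk edges n (PySem.Set.add visited i) nxt with
        | none => simp [hw] at h
        | some qc =>
          simp only [hw, Option.map_some, Option.some.injEq, Prod.mk.injEq] at h
          obtain ⟨hq, hcq⟩ := h
          subst hcq
          rw [← hq] at hc hf2 ⊢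
          obtain ⟨f2, rfl⟩ : ∃ f2, fuel2 = f2 + 1 :=
            ⟨fuel2 - 1, by omega⟩
          by_cases hic : i = qc.2
          · subst hic
            simp only [aLoop2, if_pos]
            rw [List.idxOf_cons]
            simp
          · have hct : qc.2 ∈ qc.1 := by
              rcases List.mem_cons.mp hc with h' | h'
              · exact absurd (Eq.symm h') hic
              · exact h'
            have hidx : (qc.1.cons i).idxOf qc.2 = qc.1.idxOf qc.2 + 1 := by
              rw [List.idxOf_cons]
              have hbeq : (i == qc.2) = false := beq_eq_false_iff_ne.mpr hic
              simp [hbeq]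
            rw [hidx] at hf2 ⊢
            simp only [aLoop2, if_neg hic, hg]
            rw [ih (PySem.Set.add visited i) nxt qc.1 qc.2 f2 (cursum - 1) (by simp [hw]) hct (by omega)]
            congr 1
            push_cast
            omega

-- the per-start functions agree (same result, same updated visited set)
lemma from_eq (edges : List Int) (visited : PySem.Set Int) (i : Int) :
    aFrom edges visited i = bFrom edges visited i := by
  unfold aFrom bFrom
  rw [aLoop1_eq_walk, bLoop_eq_walk]
  cases hw : pvWalk edges (2 * edges.length + 2) visited i with
  | none => rfl
  | some qc =>
    obtain ⟨q, c⟩ := qc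
    obtain ⟨hnd, _⟩ := walk_fresh edges _ _ _ _ _ hw
    have hpath : List.foldl PySem.Set.add ([] : PySem.Set Int) q = q := by
      have := foldl_add_fresh q ([] : PySem.Set Int) hnd
        (by intro x _ hx; exact absurd hx (List.not_mem_nil))
      simpa using this
    obtain ⟨hsz, hget⟩ := ordFold_spec q PySem.Dict.empty hnd
      (by intro x _; exact PySem.Dict.get?_empty x)
    simp only [Option.map_some, PySem.Set.empty]
    by_cases hc : c ∈ q
    · have hidx : q.idxOf c < 2 * edges.length + 2 := by
        have h1 := List.idxOf_lt_length_of_mem hc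
        have h2 := walk_length_le edges _ _ _ _ _ hw
        omega
      have hcb : PySem.Set.contains q c = true := (PySem.Set.contains_iff _ _).mpr hc
      rw [hpath, hget c, hsz, if_pos hc, if_pos hcb]
      rw [aLoop2_spec edges _ _ _ _ _ _ _ hw hc hidx]
      have hes : PySem.Dict.size (PySem.Dict.empty : PySem.Dict Int Int) = 0 := rfl
      rw [hes]
      norm_num
    · have hcb : PySem.Set.contains q c = false := by
        cases hcc : PySem.Set.contains q c with
        | false => rfl
        | true => exact absurd ((PySem.Set.contains_iff _ _).mp hcc) hc
      rw [hpath, hget c, if_neg hc, PySem.Dict.get?_empty]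
      simp [hc]

-- running max over the comprehension: A's fold of max equals B's collected list folded with max
lemma fold_eq_all (edges : List Int) : ∀ (idxs : List Int) (visited : PySem.Set Int) (best : Int),
    aFold edges idxs visited best = (bAll edges idxs visited).map (fun ss => ss.foldl max best) := by
  intro idxs
  induction idxs with
  | nil => intro visited best; rfl
  | cons i rest ih =>
    intro visited best
    simp only [aFold, bAll, from_eq edges visited i]
    cases bFrom edges visited i with
    | none => rfl
    | some sv =>
      simp only [ih, Option.map_map]
      cases bAll edges rest sv.2 <;> simp [List.foldl]

-- ===== VERDICT (by name: the statement is the Claim_ definition above) =====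
theorem get_maximum_circle_size_spec : Claim_equal_get_maximum_circle_size := by
  intro edges _ hpre
  unfold Spec_get_maximum_circle_size
  unfold get_maximum_circle_size get_maximum_circle_size_alt
  cases hr : PySem.List.pyRange 0 (PySem.List.len edges) 1 with
  | nil =>
    have hnone : PySem.List.max? ([] : List Int) (fun y => y) = none := rfl
    simp [bAll, hnone]
  | cons i rest =>
    simp only [from_eq edges PySem.Set.empty i, bAll]
    cases bFrom edges PySem.Set.empty i with
    | none => rfl
    | some sv =>
      simp only [fold_eq_all]
      cases hb : bAll edges rest sv.2 with
      | none => rfl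
      | some ss => simp [PySem.List.max?_id_cons]
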